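-- pv_equiv track=rewrite | github.com/theextraordinary/VASP | finetune/data/generate_edit_pattern1_150_examples.py | _important_word
-- ===== SOURCE A (Python) =====
-- STOP = {
--     "a",
--     "an",
--     "the",
--     "is",
--     "are",
--     "in",
--     "on",
--     "of",
--     "and",
--     "with",
--     "to",
--     "for",
--     "this",
--     "that",
--     "there",
--     "it",
-- }
--
-- def _tok(text: str) -> list[str]:
--     return text.split()
--
-- def _important_word(text: str) -> str:
--     for w in _tok(text):
--         t = w.strip(".,!?;:'\"").lower()
--         if len(t) >= 5 and t not in STOP:
--             return t
--     for w in _tok(text):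
--         t = w.strip(".,!?;:'\"").lower()
--         if t and t not in STOP:
--             return t
--     return "focus"
-- ===== SOURCE B (Python) =====
-- STOP = {
--     "a", "an", "the", "is", "are", "in", "on", "of", "and", "with",
--     "to", "for", "this", "that", "there", "it",
-- }
--
-- def _important_word(text: str) -> str:
--     fallback = None
--     for w in text.split():
--         t = w.strip(".,!?;:'\"").lower()
--         if t and t not in STOP:
--             if len(t) >= 5:
--                 return t
--             if fallback is None:
--                 fallback = t
--     return fallback if fallback is not None else "focus"
-- ===== Notes on version B (the rewrite author's own statement) =====
-- stated objective: simpler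
-- what changed: A scans the token list twice (first for a long non-stopword, then for any non-stopword); B makes a single pass that carries the first short non-stopword as a fallback and returns a >=5-letter non-stopword immediately.
import Mathlib
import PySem

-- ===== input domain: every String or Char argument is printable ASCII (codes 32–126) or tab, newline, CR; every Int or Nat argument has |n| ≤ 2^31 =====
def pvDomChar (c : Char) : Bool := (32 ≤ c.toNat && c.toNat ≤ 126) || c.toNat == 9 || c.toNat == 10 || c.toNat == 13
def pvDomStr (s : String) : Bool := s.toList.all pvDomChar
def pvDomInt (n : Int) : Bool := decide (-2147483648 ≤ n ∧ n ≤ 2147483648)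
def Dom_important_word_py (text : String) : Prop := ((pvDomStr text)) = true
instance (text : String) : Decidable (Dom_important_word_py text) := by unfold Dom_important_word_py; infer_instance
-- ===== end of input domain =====

-- B merges A's two scans over the tokens into one pass carrying a fallback; return value only, no side effects.

-- shared module context: the STOP set and the token/strip/lower step, identical in both Pythons
def pvSTOP : List String :=
  ["a", "an", "the", "is", "are", "in", "on", "of", "and", "with",
   "to", "for", "this", "that", "there", "it"]

def pvProc (w : String) : String :=
  PySem.Str.lower (PySem.Str.stripChars w ".,!?;:'\"")

-- ===== PORT A =====
-- first for-loop of A: first token with len(t) >= 5 and t not in STOP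
def pvALoop1 : List String → Option String
  | [] => none
  | w :: ws =>
    let t := pvProc w
    if 5 ≤ PySem.Str.len t ∧ t ∉ pvSTOP then some t else pvALoop1 ws

-- second for-loop of A: first token with t truthy and t not in STOP
def pvALoop2 : List String → Option String
  | [] => none
  | w :: ws =>
    let t := pvProc w
    if t ≠ "" ∧ t ∉ pvSTOP then some t else pvALoop2 ws

def important_word_py (text : String) : String :=
  match pvALoop1 (PySem.Str.split₀ text) with
  | some t => t
  | none =>
    match pvALoop2 (PySem.Str.split₀ text) with
    | some t => t
    | none => "focus"

-- ===== PORT B =====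
-- B's single pass with the fallback accumulator
def pvBLoop : List String → Option String → String
  | [], fb => fb.getD "focus"
  | w :: ws, fb =>
    let t := pvProc w
    if t ≠ "" ∧ t ∉ pvSTOP then
      if 5 ≤ PySem.Str.len t then t
      else pvBLoop ws (if fb.isNone then some t else fb)
    else pvBLoop ws fb

def important_word_py_alt (text : String) : String :=
  pvBLoop (PySem.Str.split₀ text) none

-- ===== PRECONDITION & SPEC =====
def Spec_important_word_py (text : String) (out : String) : Prop := out = important_word_py_alt text
instance (text : String) (out : String) : Decidable (Spec_important_word_py text out) := by unfold Spec_important_word_py; infer_instance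

-- ===== CLAIM (what is proved, stated in full; the proofs are below) =====
def Claim_equal_important_word_py : Prop := ∀ (text : String), Dom_important_word_py text → Spec_important_word_py text (important_word_py text)

-- ===== LEMMAS AND PROOFS =====

-- B's single pass computes A's two passes, for any fallback state
lemma pvBLoop_eq (ws : List String) (fb : Option String) :
    pvBLoop ws fb =
      match pvALoop1 ws with
      | some t => t
      | none =>
        match fb with
        | some f => f
        | none =>
          match pvALoop2 ws with
          | some t => t
          | none => "focus" := by
  induction ws generalizing fb with
  | nil => cases fb <;> simp [pvBLoop, pvALoop1, pvALoop2, Option.getD]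
  | cons w ws ih =>
    simp only [pvBLoop, pvALoop1, pvALoop2]
    generalize pvProc w = t
    by_cases h2 : t ≠ "" ∧ t ∉ pvSTOP
    · by_cases h5 : 5 ≤ PySem.Str.len t
      · rw [if_pos h2, if_pos h5, if_pos ⟨h5, h2.2⟩]
      · have h1 : ¬ (5 ≤ PySem.Str.len t ∧ t ∉ pvSTOP) := fun h => h5 h.1
        rw [if_pos h2, if_neg h5, if_neg h1, ih]
        cases fb <;> simp [h2.1, h2.2]
    · have h1 : ¬ (5 ≤ PySem.Str.len t ∧ t ∉ pvSTOP) := by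
        intro h
        rcases not_and_or.mp h2 with hE | hS
        · rw [not_not.mp hE] at h; exact absurd h.1 (by decide)
        · exact hS h.2
      rw [if_neg h2, if_neg h1, ih, if_neg h2]

-- ===== VERDICT (by name: the statement is the Claim_ definition above) =====
theorem important_word_py_spec : Claim_equal_important_word_py := by
  intro text _
  unfold Spec_important_word_py important_word_py important_word_py_alt
  rw [pvBLoop_eq]
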